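-- pv_equiv track=rewrite | github.com/pypi-data/pypi-mirror-401 | packages/task-ng/task_ng-0.1.6.tar.gz/task_ng-0.1.6/src/taskng/sync/conflict.py | merge_uda
-- ===== SOURCE A (Python) =====
-- def merge_uda(
--     local: dict[str, str],
--     remote: dict[str, str],
--     base: dict[str, str] | None = None,
-- ) -> dict[str, str]:
--     """Merge user-defined attributes.
--
--     Uses last-write-wins for conflicting keys based on which dict
--     was more recently modified (we don't track per-UDA timestamps,
--     so remote wins for conflicts).
--
--     Args:
--         local: Local UDAs.
--         remote: Remote UDAs.
--         base: Base UDAs.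
--
--     Returns:
--         Merged UDA dictionary.
--     """
--     if base is None:
--         # No base - remote wins for conflicts
--         return {**local, **remote}
--
--     merged = dict(base)
--
--     # Apply local changes
--     for key, value in local.items():
--         if key not in base or base.get(key) != value:
--             merged[key] = value
--
--     # Apply remote changes (remote wins for conflicts)
--     for key, value in remote.items():
--         if key not in base or base.get(key) != value:
--             merged[key] = value
--
--     # Remove keys deleted by both
--     for key in list(merged.keys()):
--         if key in base and key not in local and key not in remote:
--             del merged[key]
--
--     return merged
-- ===== SOURCE B (Python) =====
-- def merge_uda(local, remote, base=None):
--     """Three-way UDA merge, built as one key-order list plus a value rule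
--     (no mutable copy of base, no deletion pass)."""
--     if base is None:
--         return {**local, **remote}
--
--     def pick(k):
--         if k in remote and (k not in base or base[k] != remote[k]):
--             return remote[k]  # remote changed (or added) the key: remote wins
--         if k in local:
--             return local[k]   # remote kept the base value (or is absent): local wins
--         return remote[k]      # only remote has it, unchanged from base
--
--     keys = ([k for k in base if k in local or k in remote]
--             + [k for k in local if k not in base]
--             + [k for k in remote if k not in base and k not in local])
--     return {k: pick(k) for k in keys}
-- ===== Notes on version B (the rewrite author's own statement) =====
-- stated objective: alternative
-- what changed: B replaces A's mutate-a-copy-of-base pipeline (copy base, two conditional update loops, then a deletion pass over the merged keys) by a single pure construction: it builds the result key order explicitly (surviving base keys, then new local keys, then new remote keys) and computes each value once with a three-way pick rule (remote wins iff it changed the base value or the key is new).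
import Mathlib
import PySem

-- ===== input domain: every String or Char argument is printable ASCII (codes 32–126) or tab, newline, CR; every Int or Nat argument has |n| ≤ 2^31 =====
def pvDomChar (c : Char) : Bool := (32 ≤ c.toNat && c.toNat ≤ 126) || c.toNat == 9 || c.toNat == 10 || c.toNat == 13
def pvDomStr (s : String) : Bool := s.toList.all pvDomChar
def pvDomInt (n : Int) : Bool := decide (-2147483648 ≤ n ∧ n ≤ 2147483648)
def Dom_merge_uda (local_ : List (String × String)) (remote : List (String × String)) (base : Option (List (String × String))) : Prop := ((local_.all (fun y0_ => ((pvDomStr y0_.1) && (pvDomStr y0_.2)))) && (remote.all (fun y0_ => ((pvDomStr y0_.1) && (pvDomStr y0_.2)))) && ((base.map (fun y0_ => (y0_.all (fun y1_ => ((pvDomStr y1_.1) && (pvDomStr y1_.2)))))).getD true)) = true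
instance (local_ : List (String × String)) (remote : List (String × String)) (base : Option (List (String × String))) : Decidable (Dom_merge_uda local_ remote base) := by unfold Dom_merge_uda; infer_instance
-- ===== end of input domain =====

-- B replaces A's mutate-a-copy-of-base pipeline by a single pure construction: an explicit
-- result key order plus a three-way value rule per key (objective: alternative, same cost).

-- ===== PORT A =====
def merge_uda (local_ : List (String × String)) (remote : List (String × String)) (base : Option (List (String × String))) : List (String × String) :=
  let ld := PySem.Dict.ofList local_
  let rd := PySem.Dict.ofList remote
  match base with
  | none => (ld.update rd.items).items           -- return {**local, **remote}
  | some b =>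
    let bd := PySem.Dict.ofList b
    let merged := bd                              -- merged = dict(base)
    -- for key, value in local.items(): if key not in base or base.get(key) != value: merged[key] = value
    let merged := ld.items.foldl (fun m p =>
      if !(bd.contains p.1) || !(bd.get? p.1 == some p.2) then m.insert p.1 p.2 else m) merged
    -- for key, value in remote.items(): same condition
    let merged := rd.items.foldl (fun m p =>
      if !(bd.contains p.1) || !(bd.get? p.1 == some p.2) then m.insert p.1 p.2 else m) merged
    -- for key in list(merged.keys()): if key in base and key not in local and key not in remote: del merged[key]
    let merged := merged.keys.foldl (fun m k =>
      if bd.contains k && !(ld.contains k) && !(rd.contains k) then m.erase k else m) merged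
    merged.items

-- ===== PORT B =====
def merge_uda_alt (local_ : List (String × String)) (remote : List (String × String)) (base : Option (List (String × String))) : List (String × String) :=
  let ld := PySem.Dict.ofList local_
  let rd := PySem.Dict.ofList remote
  match base with
  | none => (ld.update rd.items).items           -- return {**local, **remote}
  | some b =>
    let bd := PySem.Dict.ofList b
    -- pick(k); the `.getD ""` stands for the subscript remote[k]/local[k], guarded by the contains tests
    let pick := fun (k : String) =>
      if rd.contains k && (!(bd.contains k) || !(bd.get? k == rd.get? k)) then (rd.get? k).getD ""
      else if ld.contains k then (ld.get? k).getD ""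
      else (rd.get? k).getD ""
    let keys := (bd.keys.filter (fun k => ld.contains k || rd.contains k))
      ++ (ld.keys.filter (fun k => !(bd.contains k)))
      ++ (rd.keys.filter (fun k => !(bd.contains k) && !(ld.contains k)))
    keys.map (fun k => (k, pick k))

-- ===== PRECONDITION & SPEC =====
def Spec_merge_uda (local_ : List (String × String)) (remote : List (String × String)) (base : Option (List (String × String))) (out : List (String × String)) : Prop := out = merge_uda_alt local_ remote base
instance (local_ : List (String × String)) (remote : List (String × String)) (base : Option (List (String × String))) (out : List (String × String)) : Decidable (Spec_merge_uda local_ remote base out) := by unfold Spec_merge_uda; infer_instance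

-- ===== CLAIM (what is proved, stated in full; the proofs are below) =====
def Claim_equal_merge_uda : Prop := ∀ (local_ : List (String × String)) (remote : List (String × String)) (base : Option (List (String × String))), Dom_merge_uda local_ remote base → Spec_merge_uda local_ remote base (merge_uda local_ remote base)

-- ===== LEMMAS AND PROOFS =====

-- (map fst of a key-predicate filter commutes)
theorem pv_filter_map {α β : Type} (l : List α) (f : α → β) (p : β → Bool) :
    (l.map f).filter p = (l.filter (fun x => p (f x))).map f := by
  induction l with
  | nil => rfl
  | cons a t ih => simp only [List.map_cons, List.filter_cons]; split <;> simp [ih]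

theorem pv_find?_filter {α : Type} (l : List α) (c p : α → Bool) :
    (l.filter c).find? p = l.find? (fun a => c a && p a) := by
  induction l with
  | nil => rfl
  | cons a t ih =>
    by_cases h : c a <;> simp [h, List.find?_cons, ih]


theorem pv_find?_and {α β : Type} [BEq α] [LawfulBEq α] (l : List (α × β)) (c : α × β → Bool) (k : α)
    (hl : (l.map Prod.fst).Nodup) :
    l.find? (fun q => c q && (q.1 == k)) =
      (l.find? (fun q => q.1 == k)).bind (fun q => if c q then some q else none) := by
  induction l with
  | nil => rfl
  | cons a t ih =>
    simp only [List.map_cons, List.nodup_cons] at hl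
    by_cases hk : a.1 = k
    · subst hk
      by_cases hc : c a <;> simp [hc]
      · -- c a = false: LHS must skip a and find nothing in t
        intro a1 b hmem _ h
        exact hl.1 (h ▸ List.mem_map_of_mem hmem)
    · have hb : (a.1 == k) = false := by simp [hk]
      simp [hb, ih hl.2]

theorem pv_any_key {α : Type} [BEq α] [LawfulBEq α] (ks : List α) (q : α → Bool) (x : α) (hx : x ∈ ks) :
    ks.any (fun k => q k && (x == k)) = q x := by
  by_cases hq : q x = true
  · rw [hq, List.any_eq_true]
    exact ⟨x, hx, by simp [hq]⟩
  · simp only [Bool.not_eq_true] at hq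
    rw [hq, List.any_eq_false]
    intro k hk
    by_cases hxk : x = k
    · subst hxk; simp [hq]
    · simp [hxk]


theorem pv_insert_eq_self {α β : Type} [BEq α] [LawfulBEq α] (d : PySem.Dict α β) (k : α) (v : β)
    (hd : d.keys.Nodup) (h : d.get? k = some v) : d.insert k v = d := by
  have hc : d.contains k = true := by
    rw [PySem.Dict.contains_eq_isSome_get?, h]; rfl
  apply PySem.Dict.ext
  rw [PySem.Dict.items_insert_of_contains _ _ hc]
  have : ∀ p ∈ d.items, (if (p.1 == k) = true then (k, v) else p) = p := by
    intro p hp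
    split
    · next hb =>
      have hk : p.1 = k := beq_iff_eq.mp hb
      have hp' : (p.1, p.2) ∈ d.items := by simpa using hp
      have := PySem.Dict.get?_of_mem_items d hp' hd
      rw [hk, h] at this
      have h2 : p.2 = v := by injection this with hv; exact hv.symm
      rw [← hk, ← h2]
    · rfl
  rw [List.map_congr_left this, List.map_id']

theorem pv_cond_foldl_eq_update {α β : Type} [BEq α] [LawfulBEq α] (c : α × β → Bool)
    (l : List (α × β)) (d : PySem.Dict α β) (hl : (l.map Prod.fst).Nodup) (hd : d.keys.Nodup)
    (h : ∀ p ∈ l, c p = false → d.get? p.1 = some p.2) :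
    l.foldl (fun m p => if c p then m.insert p.1 p.2 else m) d = d.update l := by
  induction l generalizing d with
  | nil => rfl
  | cons a t ih =>
    simp only [List.map_cons, List.nodup_cons] at hl
    have hstep : ∀ p ∈ t, c p = false → (d.insert a.1 a.2).get? p.1 = some p.2 := by
      intro p hp hc
      rw [PySem.Dict.get?_insert_of_ne]
      · exact h p (List.mem_cons_of_mem _ hp) hc
      · intro he
        exact hl.1 (he ▸ List.mem_map_of_mem hp)
    by_cases hc : c a = true
    · simp only [List.foldl_cons, hc]
      show _ = d.update (a :: t)
      rw [show d.update (a :: t) = (d.insert a.1 a.2).update t from rfl]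
      exact ih (d.insert a.1 a.2) hl.2 (PySem.Dict.nodup_keys_insert _ _ _ hd) hstep
    · simp only [Bool.not_eq_true] at hc
      have he : d.insert a.1 a.2 = d := pv_insert_eq_self d a.1 a.2 hd (h a List.mem_cons_self hc)
      simp only [List.foldl_cons, hc, Bool.false_eq_true, if_false]
      rw [show d.update (a :: t) = (d.insert a.1 a.2).update t from rfl, he]
      exact ih d hl.2 hd (fun p hp hcc => h p (List.mem_cons_of_mem _ hp) hcc)

theorem pv_get?_update {α β : Type} [BEq α] [LawfulBEq α] (l : List (α × β)) (d : PySem.Dict α β)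
    (k : α) (hl : (l.map Prod.fst).Nodup) :
    (d.update l).get? k = match l.find? (fun q => q.1 == k) with
      | some q => some q.2
      | none => d.get? k := by
  induction l generalizing d with
  | nil => rfl
  | cons a t ih =>
    simp only [List.map_cons, List.nodup_cons] at hl
    rw [show d.update (a :: t) = (d.insert a.1 a.2).update t from rfl, ih _ hl.2]
    by_cases hk : a.1 = k
    · subst hk
      have hnone : t.find? (fun q => q.1 == a.1) = none := by
        rw [List.find?_eq_none]
        intro q hq hbeq
        exact hl.1 (beq_iff_eq.mp hbeq ▸ List.mem_map_of_mem hq)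
      simp [hnone, PySem.Dict.get?_insert_self]
    · have hb : (a.1 == k) = false := by simp [hk]
      simp only [List.find?_cons, hb]
      cases t.find? (fun q => q.1 == k) with
      | some q => simp
      | none => simp [PySem.Dict.get?_insert_of_ne _ _ (Ne.symm hk)]

theorem pv_keys_update {α β : Type} [BEq α] [LawfulBEq α] (l : List (α × β)) (d : PySem.Dict α β)
    (hl : (l.map Prod.fst).Nodup) :
    (d.update l).keys = d.keys ++ (l.map Prod.fst).filter (fun y => !(d.keys.contains y)) := by
  have h1 : d.update l = l.foldl (fun m p => m.insert (Prod.fst p) ((fun (_ : PySem.Dict α β) (x : α × β) => x.2) m p)) d := rfl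
  rw [h1, PySem.Dict.keys_foldl_insert_key, PySem.Set.update_eq_append_filter,
     PySem.Set.ofList_eq_self_of_nodup _ hl]
  rfl

theorem pv_erase_foldl_items {α β : Type} [BEq α] [LawfulBEq α] (q : α → Bool) (ks : List α)
    (d : PySem.Dict α β) :
    (ks.foldl (fun m k => if q k then m.erase k else m) d).items =
      d.items.filter (fun p => !(ks.any (fun k => q k && (p.1 == k)))) := by
  induction ks generalizing d with
  | nil => simp
  | cons a t ih =>
    rw [List.foldl_cons, ih]
    by_cases hq : q a = true
    · rw [if_pos hq]
      show (d.erase a).items.filter _ = _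
      rw [show (d.erase a).items = d.items.filter (fun p => !(p.1 == a)) from rfl,
        List.filter_filter]
      apply List.filter_congr
      intro p hp
      simp only [List.any_cons, hq, Bool.true_and, Bool.not_or]
      rw [Bool.and_comm]
    · simp only [Bool.not_eq_true] at hq
      rw [if_neg (by simp [hq])]
      apply List.filter_congr
      intro p hp
      simp only [List.any_cons, hq, Bool.false_and, Bool.false_or]

theorem pv_keys_contains {α β : Type} [BEq α] [LawfulBEq α] (d : PySem.Dict α β) (k : α) :
    d.keys.contains k = d.contains k := by
  rcases d with ⟨items⟩
  induction items with
  | nil => rfl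
  | cons p t ih =>
    show ((p.1 :: (PySem.Dict.mk t).keys).contains k) = _
    rw [List.contains_cons]
    show (k == p.1 || (PySem.Dict.mk t).keys.contains k) = ((p.1 == k) || (PySem.Dict.mk t).contains k)
    rw [ih, BEq.comm]

-- membership in keys gives contains = true
theorem pv_contains_of_mem_keys {α β : Type} [BEq α] [LawfulBEq α] (d : PySem.Dict α β) {k : α}
    (h : k ∈ d.keys) : d.contains k = true := by
  rw [← pv_keys_contains]
  exact List.elem_eq_true_of_mem h

theorem pv_main (local_ remote b : List (String × String)) :
    merge_uda local_ remote (some b) = merge_uda_alt local_ remote (some b) := by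
  simp only [merge_uda, merge_uda_alt]
  set ld := PySem.Dict.ofList local_ with hld
  set rd := PySem.Dict.ofList remote with hrd
  set bd := PySem.Dict.ofList b with hbd
  have hLd : ld.keys.Nodup := PySem.Dict.nodup_keys_ofList _
  have hRd : rd.keys.Nodup := PySem.Dict.nodup_keys_ofList _
  have hBd : bd.keys.Nodup := PySem.Dict.nodup_keys_ofList _
  have hLd' : (ld.items.map Prod.fst).Nodup := hLd
  have hRd' : (rd.items.map Prod.fst).Nodup := hRd
  -- the shared condition of A's two update loops
  set c : String × String → Bool :=
    fun p => !(bd.contains p.1) || !(bd.get? p.1 == some p.2) with hc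
  set qdel : String → Bool :=
    fun k => bd.contains k && !(ld.contains k) && !(rd.contains k) with hqdel
  -- step 1: the local loop is dict.update
  have step1 : ld.items.foldl (fun m p =>
      if !(bd.contains p.1) || !(bd.get? p.1 == some p.2) then m.insert p.1 p.2 else m) bd
      = bd.update ld.items := by
    apply pv_cond_foldl_eq_update _ _ _ hLd' hBd
    intro p hp hcp
    simp only [Bool.or_eq_false_iff, Bool.not_eq_false'] at hcp
    exact (beq_iff_eq).mp hcp.2
  rw [step1]
  -- step 2: the remote loop is dict.update with the changed entries
  set r' : List (String × String) := rd.items.filter c with hr'def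
  have hr' : (r'.map Prod.fst).Nodup :=
    List.Nodup.sublist (List.Sublist.map Prod.fst List.filter_sublist) hRd'
  have step2 : rd.items.foldl (fun m p =>
      if !(bd.contains p.1) || !(bd.get? p.1 == some p.2) then m.insert p.1 p.2 else m)
        (bd.update ld.items)
      = (bd.update ld.items).update r' := by
    show _ = r'.foldl (fun m p => m.insert p.1 p.2) (bd.update ld.items)
    rw [hr'def, List.foldl_filter]
  rw [step2]
  set m2 : PySem.Dict String String := (bd.update ld.items).update r' with hm2def
  have hm2 : m2.keys.Nodup :=
    PySem.Dict.nodup_keys_update _ _ (PySem.Dict.nodup_keys_update _ _ hBd)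
  -- step 3: the deletion loop filters the items
  rw [pv_erase_foldl_items]
  have step3 : m2.items.filter
        (fun p => !(m2.keys.any (fun k => qdel k && (p.1 == k))))
      = m2.items.filter (fun p => !(qdel p.1)) := by
    apply List.filter_congr
    intro p hp
    exact congrArg (fun x => !x)
      (pv_any_key m2.keys qdel p.1 (PySem.Dict.mem_keys_of_mem_items m2 hp))
  rw [step3]
  -- package the filtered items as a dict m3
  set m3 : PySem.Dict String String := PySem.Dict.mk (m2.items.filter (fun p => !(qdel p.1))) with hm3def
  show m3.items = _
  have hkeys3 : m3.keys = m2.keys.filter (fun k => !(qdel k)) := by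
    show (m2.items.filter (fun p => !(qdel p.1))).map (fun x => x.1) = _
    rw [show (fun k => !(qdel k)) = fun k => !(qdel k) from rfl]
    exact (pv_filter_map m2.items (fun x => x.1) (fun k => !(qdel k))).symm
  have hm3 : m3.keys.Nodup := by
    rw [hkeys3]; exact List.Nodup.filter _ hm2
  rw [PySem.Dict.items_eq_map_keys m3 hm3 ""]
  -- the two key lists coincide
  have hm1keys : (bd.update ld.items).keys
      = bd.keys ++ ld.keys.filter (fun y => !(bd.keys.contains y)) :=
    pv_keys_update ld.items bd hLd'
  have hm2keys : m2.keys = (bd.update ld.items).keys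
      ++ (r'.map Prod.fst).filter (fun y => !((bd.update ld.items).keys.contains y)) :=
    pv_keys_update r' _ hr'
  have hKeq : m3.keys =
      (bd.keys.filter (fun k => ld.contains k || rd.contains k))
      ++ (ld.keys.filter (fun k => !(bd.contains k)))
      ++ (rd.keys.filter (fun k => !(bd.contains k) && !(ld.contains k))) := by
    rw [hkeys3, hm2keys, hm1keys, List.filter_append, List.filter_append,
      List.filter_filter, List.filter_filter]
    congr 1
    congr 1
    · -- base segment
      apply List.filter_congr
      intro k hk
      have hbk : bd.contains k = true := pv_contains_of_mem_keys bd hk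
      rw [hqdel]
      simp only [hbk, Bool.true_and, Bool.not_and, Bool.not_not]
    · -- local-new segment
      apply List.filter_congr
      intro k hk
      rw [hqdel, pv_keys_contains]
      cases hbk : bd.contains k <;> simp [hbk]
    · -- remote-new segment
      rw [show (r'.map Prod.fst) = r'.map (fun x => x.1) from rfl,
        pv_filter_map r' (fun x => x.1)
          (fun y => (!(qdel y)) && !(((bd.keys ++ ld.keys.filter (fun y => !(bd.keys.contains y))).contains y)))]
      rw [hr'def, List.filter_filter]
      rw [show rd.keys = rd.items.map (fun x => x.1) from rfl,
        pv_filter_map rd.items (fun x => x.1) (fun k => !(bd.contains k) && !(ld.contains k))]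
      apply congrArg (List.map _)
      apply List.filter_congr
      intro p hp
      have hrk : rd.contains p.1 = true :=
        pv_contains_of_mem_keys rd (PySem.Dict.mem_keys_of_mem_items rd hp)
      rw [hqdel, hc]
      cases hbk : bd.contains p.1 with
      | true =>
        have h1 : (bd.keys ++ ld.keys.filter (fun y => !(bd.keys.contains y))).contains p.1 = true := by
          rw [List.contains_append, pv_keys_contains, hbk, Bool.true_or]
        simp only [hbk, h1, hrk]
        simp
      | false =>
        have hbk' : bd.keys.contains p.1 = false := by rw [pv_keys_contains]; exact hbk
        cases hlk : ld.contains p.1 with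
        | true =>
          have h1 : (bd.keys ++ ld.keys.filter (fun y => !(bd.keys.contains y))).contains p.1 = true := by
            rw [List.contains_append]
            have hm : p.1 ∈ ld.keys.filter (fun y => !(bd.keys.contains y)) :=
              List.mem_filter.mpr ⟨(PySem.Dict.contains_iff_mem_keys ld p.1).mp hlk, by rw [hbk']; rfl⟩
            have h2 : (ld.keys.filter (fun y => !(bd.keys.contains y))).contains p.1 = true :=
              List.elem_eq_true_of_mem hm
            rw [h2, Bool.or_true]
          simp [hbk, hlk, hrk]
          intro hnb
          exact ⟨(PySem.Dict.contains_iff_mem_keys ld p.1).mp hlk, hnb⟩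
        | false =>
          have h1 : (bd.keys ++ ld.keys.filter (fun y => !(bd.keys.contains y))).contains p.1 = false := by
            rw [List.contains_append, hbk', Bool.false_or]
            cases h2 : (ld.keys.filter (fun y => !(bd.keys.contains y))).contains p.1 with
            | false => rfl
            | true =>
              exfalso
              have hm := List.mem_of_elem_eq_true h2
              have : ld.contains p.1 = true :=
                (PySem.Dict.contains_iff_mem_keys ld p.1).mpr (List.mem_of_mem_filter hm)
              rw [this] at hlk; exact Bool.noConfusion hlk
          simp [hbk, hlk, hrk]
          refine ⟨fun hm => ?_, Or.inl (fun hm => ?_)⟩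
          · rw [(PySem.Dict.contains_iff_mem_keys bd p.1).mpr hm] at hbk; exact Bool.noConfusion hbk
          · rw [(PySem.Dict.contains_iff_mem_keys ld p.1).mpr hm] at hlk; exact Bool.noConfusion hlk
  -- the values coincide on the key list
  have hVeq : ∀ k ∈ m3.keys, m3.getD k "" =
      (if rd.contains k && (!(bd.contains k) || !(bd.get? k == rd.get? k)) then (rd.get? k).getD ""
       else if ld.contains k then (ld.get? k).getD ""
       else (rd.get? k).getD "") := by
    intro k hk
    -- k carries at least one of local/remote
    have hlr : ld.contains k || rd.contains k = true := by
      rw [hKeq] at hk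
      rcases List.mem_append.mp hk with hk | hk
      · rcases List.mem_append.mp hk with hk | hk
        · have := (List.mem_filter.mp hk).2; simpa using this
        · simp [pv_contains_of_mem_keys ld (List.mem_of_mem_filter hk)]
      · simp [pv_contains_of_mem_keys rd (List.mem_of_mem_filter hk)]
    have hdel : qdel k = false := by
      rw [hqdel]
      cases hl0 : ld.contains k with
      | true => simp [hl0]
      | false =>
        cases hr0 : rd.contains k with
        | true => simp [hr0]
        | false => rw [hl0, hr0] at hlr; simp at hlr
    -- m3 lookup reduces to m2 lookup
    have hg3 : m3.get? k = m2.get? k := by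
      show ((m2.items.filter (fun p => !(qdel p.1))).find? (fun p => p.1 == k)).map (fun x => x.2)
        = (m2.items.find? (fun p => p.1 == k)).map (fun x => x.2)
      rw [pv_find?_filter]
      apply congrArg
      have hfe : (fun p : String × String => !(qdel p.1) && (p.1 == k))
          = (fun p : String × String => p.1 == k) := by
        funext p
        by_cases hpk : p.1 = k
        · subst hpk; simp [hdel]
        · simp [hpk]
      rw [hfe]
    -- m2 lookup in terms of rd / ld / bd
    have hg2 := pv_get?_update r' (bd.update ld.items) k hr'
    rw [← hm2def] at hg2
    have hg1 := pv_get?_update ld.items bd k hLd'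
    have hfr' : r'.find? (fun q => q.1 == k)
        = (rd.items.find? (fun q => q.1 == k)).bind (fun q => if c q then some q else none) := by
      rw [hr'def, pv_find?_filter, pv_find?_and rd.items c k hRd']
    have hgr : rd.get? k = (rd.items.find? (fun q => q.1 == k)).map (fun x => x.2) := rfl
    have hgl : ld.get? k = (ld.items.find? (fun q => q.1 == k)).map (fun x => x.2) := rfl
    have hcr : rd.contains k = (rd.get? k).isSome := PySem.Dict.contains_eq_isSome_get? rd k
    have hcl : ld.contains k = (ld.get? k).isSome := PySem.Dict.contains_eq_isSome_get? ld k
    rw [PySem.Dict.getD_eq_get?_getD, hg3, hg2, hfr']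
    cases hfr : rd.items.find? (fun q => q.1 == k) with
    | some qr =>
      have hqr1 : qr.1 = k := by
        have := List.find?_some hfr
        exact beq_iff_eq.mp this
      have hrget : rd.get? k = some qr.2 := by rw [hgr, hfr]; rfl
      have hrcont : rd.contains k = true := by rw [hcr, hrget]; rfl
      by_cases hcq : c qr = true
      · -- remote changed the value: remote wins on both sides
        have hcond : (rd.contains k && (!(bd.contains k) || !(bd.get? k == rd.get? k))) = true := by
          rw [hrcont, hrget, Bool.true_and]
          simp only [hc] at hcq
          rw [hqr1] at hcq
          exact hcq
        rw [hcond, if_pos rfl, hrget]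
        simp [hcq]
      · -- remote kept the base value
        simp only [Bool.not_eq_true] at hcq
        have hcq0 : c qr = false := hcq
        simp only [hc] at hcq
        simp only [Bool.or_eq_false_iff, Bool.not_eq_false'] at hcq
        have hbmatch : bd.get? k = some qr.2 := by
          have := (beq_iff_eq (a := bd.get? qr.1) (b := some qr.2)).mp hcq.2
          rw [← hqr1]; exact this
        have hbcont : bd.contains k = true := by rw [← hqr1]; exact hcq.1
        have hcond : (rd.contains k && (!(bd.contains k) || !(bd.get? k == rd.get? k))) = false := by
          rw [hrget, hbcont, hbmatch]
          simp
        rw [hcond]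
        simp only [hcq0, Option.bind_some, Bool.false_eq_true, if_false, hg1]
        cases hfl : ld.items.find? (fun q => q.1 == k) with
        | some ql =>
          have hlget : ld.get? k = some ql.2 := by rw [hgl, hfl]; rfl
          have hlcont : ld.contains k = true := by rw [hcl, hlget]; rfl
          simp [hlcont, hlget]
        | none =>
          have hlget : ld.get? k = none := by rw [hgl, hfl]; rfl
          have hlcont : ld.contains k = false := by rw [hcl, hlget]; rfl
          simp [hlcont, hbmatch, hrget]
    | none =>
      have hrget : rd.get? k = none := by rw [hgr, hfr]; rfl
      have hrcont : rd.contains k = false := by rw [hcr, hrget]; rfl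
      rw [hrcont]
      simp only [Bool.false_and, Bool.false_eq_true, if_false, Option.bind_none, hg1]
      cases hfl : ld.items.find? (fun q => q.1 == k) with
      | some ql =>
        have hlget : ld.get? k = some ql.2 := by rw [hgl, hfl]; rfl
        have hlcont : ld.contains k = true := by rw [hcl, hlget]; rfl
        simp [hlcont, hlget]
      | none =>
        have hlget : ld.get? k = none := by rw [hgl, hfl]; rfl
        have hlcont : ld.contains k = false := by rw [hcl, hlget]; rfl
        rw [hlcont, hrcont] at hlr
        simp at hlr
  rw [← hKeq]
  apply List.map_congr_left
  intro k hk
  rw [hVeq k hk]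

-- ===== VERDICT (by name: the statement is the Claim_ definition above) =====
theorem merge_uda_spec : Claim_equal_merge_uda := by
  intro local_ remote base _
  unfold Spec_merge_uda
  cases base with
  | none => rfl
  | some b => exact pv_main local_ remote b
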